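-- pv_equiv track=rewrite | github.com/Henry0105/dpi-business | sbin/main/module/events/filter.py | _get_in_not_in_value
-- ===== SOURCE A (Python) =====
-- def _get_in_not_in_value(d, key):
--     if key in d:
--         in_value = ""
--         notin_value = ""
--         for e in d[key]:
--             if 'opt' in e:
--                 if 'in' == e['opt']:
--                     in_value = e.get('value', '')
--                 if 'notin' == e['opt']:
--                     notin_value = e.get('value', '')
--         return in_value, notin_value
--     else:
--         return "", ""
-- ===== SOURCE B (Python) =====
-- def _get_in_not_in_value(d, key):
--     def last(opt):
--         for e in reversed(d.get(key, [])):
--             if e.get('opt') == opt: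
--                 return e.get('value', '')
--         return ''
--     return last('in'), last('notin')
-- ===== Notes on version B (the rewrite author's own statement) =====
-- stated objective: simpler
-- what changed: Replaces the single forward accumulator loop with two early-exit scans of the reversed list (last match wins becomes first match in reverse), dropping the two mutable accumulator variables.
import Mathlib
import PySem

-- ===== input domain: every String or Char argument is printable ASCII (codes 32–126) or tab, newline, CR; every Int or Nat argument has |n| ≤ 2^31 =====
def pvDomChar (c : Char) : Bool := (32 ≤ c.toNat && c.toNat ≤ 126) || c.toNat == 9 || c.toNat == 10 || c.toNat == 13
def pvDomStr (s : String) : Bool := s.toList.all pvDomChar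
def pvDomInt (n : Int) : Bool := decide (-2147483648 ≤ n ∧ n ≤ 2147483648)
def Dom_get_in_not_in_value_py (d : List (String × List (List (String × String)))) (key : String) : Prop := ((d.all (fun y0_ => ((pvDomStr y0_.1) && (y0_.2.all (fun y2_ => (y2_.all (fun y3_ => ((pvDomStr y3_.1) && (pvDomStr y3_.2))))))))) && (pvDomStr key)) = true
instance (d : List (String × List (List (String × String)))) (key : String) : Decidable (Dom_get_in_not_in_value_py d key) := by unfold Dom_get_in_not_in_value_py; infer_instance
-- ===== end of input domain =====

-- B replaces A's forward loop with two accumulators by two early-exit scans of the reversed list (simpler; same O(n) cost).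

-- ===== PORT A =====
-- first-match association-list lookup = Python dict lookup under the type convention
def pvLookup (e : List (String × String)) (k : String) : Option String :=
  match e with
  | [] => none
  | (k', v) :: rest => if k' = k then some v else pvLookup rest k

-- port of A: the for-loop with the two accumulators, branches in A's order
def pvStepA (st : String × String) (e : List (String × String)) : String × String :=
  match pvLookup e "opt" with
  | some o =>
      let st1 := if o = "in" then ((pvLookup e "value").getD "", st.2) else st
      if o = "notin" then (st1.1, (pvLookup e "value").getD "") else st1
  | none => st

def get_in_not_in_value_py (d : List (String × List (List (String × String)))) (key : String) : String × String :=
  match pvLookupL d key with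
  | some lst => lst.foldl pvStepA ("", "")
  | none => ("", "")
where
  pvLookupL (d : List (String × List (List (String × String)))) (k : String) :
      Option (List (List (String × String))) :=
    match d with
    | [] => none
    | (k', v) :: rest => if k' = k then some v else pvLookupL rest k

-- ===== PORT B =====
-- B-side first-match lookup on an entry dict (= e.get(k))
def pvGet? (e : List (String × String)) (k : String) : Option String :=
  match e with
  | [] => none
  | (k', v) :: rest => if k' = k then some v else pvGet? rest k

-- d.get(key, []) for B
def pvGetList (d : List (String × List (List (String × String)))) (k : String) :
    List (List (String × String)) :=
  match d with
  | [] => []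
  | (k', v) :: rest => if k' = k then v else pvGetList rest k

-- port of B's inner 'last(opt)': scan the (already reversed) list, early return on first hit
def pvLast (lst : List (List (String × String))) (opt : String) : String :=
  match lst with
  | [] => ""
  | e :: rest =>
      if pvGet? e "opt" = some opt then (pvGet? e "value").getD ""
      else pvLast rest opt

def get_in_not_in_value_py_alt (d : List (String × List (List (String × String)))) (key : String) : String × String :=
  let lst := pvGetList d key
  (pvLast lst.reverse "in", pvLast lst.reverse "notin")

-- ===== PRECONDITION & SPEC =====
def Spec_get_in_not_in_value_py (d : List (String × List (List (String × String)))) (key : String) (out : String × String) : Prop := out = get_in_not_in_value_py_alt d key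
instance (d : List (String × List (List (String × String)))) (key : String) (out : String × String) : Decidable (Spec_get_in_not_in_value_py d key out) := by unfold Spec_get_in_not_in_value_py; infer_instance

-- ===== CLAIM (what is proved, stated in full; the proofs are below) =====
def Claim_equal_get_in_not_in_value_py : Prop := ∀ (d : List (String × List (List (String × String)))) (key : String), Dom_get_in_not_in_value_py d key → Spec_get_in_not_in_value_py d key (get_in_not_in_value_py d key)

-- ===== LEMMAS AND PROOFS =====

-- first-match (Option) scan of a list of entry-dicts for a given opt
def pvFirst? (lst : List (List (String × String))) (opt : String) : Option String :=
  match lst with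
  | [] => none
  | e :: rest =>
      if pvLookup e "opt" = some opt then some ((pvLookup e "value").getD "")
      else pvFirst? rest opt

theorem pvGet?_eq_pvLookup (e : List (String × String)) (k : String) :
    pvGet? e k = pvLookup e k := by
  induction e with
  | nil => rfl
  | cons p rest ih => simp [pvGet?, pvLookup, ih]

theorem pvGetList_eq (d : List (String × List (List (String × String)))) (k : String) :
    pvGetList d k = (get_in_not_in_value_py.pvLookupL d k).getD [] := by
  induction d with
  | nil => rfl
  | cons p rest ih =>
      simp [pvGetList, get_in_not_in_value_py.pvLookupL]; split <;> simp [ih]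

theorem pvLast_eq_first (lst : List (List (String × String))) (opt : String) :
    pvLast lst opt = (pvFirst? lst opt).getD "" := by
  induction lst with
  | nil => rfl
  | cons e rest ih =>
      simp [pvLast, pvFirst?, pvGet?_eq_pvLookup]; split <;> simp [ih]

theorem pvFirst?_append (xs ys : List (List (String × String))) (opt : String) :
    pvFirst? (xs ++ ys) opt = (pvFirst? xs opt).or (pvFirst? ys opt) := by
  induction xs with
  | nil => simp [pvFirst?]
  | cons e rest ih => simp [pvFirst?]; split <;> simp [ih]

-- the two components of A's step, per opt
theorem pvStepA_fst (st : String × String) (e : List (String × String)) :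
    (pvStepA st e).1 =
      if pvLookup e "opt" = some "in" then (pvLookup e "value").getD "" else st.1 := by
  unfold pvStepA
  rcases h : pvLookup e "opt" with _ | o <;> simp [h]
  by_cases hi : o = "in" <;> by_cases hn : o = "notin" <;> simp_all

theorem pvStepA_snd (st : String × String) (e : List (String × String)) :
    (pvStepA st e).2 =
      if pvLookup e "opt" = some "notin" then (pvLookup e "value").getD "" else st.2 := by
  unfold pvStepA
  rcases h : pvLookup e "opt" with _ | o <;> simp [h]
  by_cases hi : o = "in" <;> by_cases hn : o = "notin" <;> simp_all

-- A's fold equals the first match on the reversed list, componentwise, for any start state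
theorem pvFold_eq (lst : List (List (String × String))) (st : String × String) :
    lst.foldl pvStepA st =
      ((pvFirst? lst.reverse "in").getD st.1, (pvFirst? lst.reverse "notin").getD st.2) := by
  induction lst generalizing st with
  | nil => simp [pvFirst?]
  | cons e rest ih =>
      simp only [List.foldl_cons, List.reverse_cons, ih, pvFirst?_append, Prod.mk.injEq]
      constructor <;>
      · rcases h : pvFirst? rest.reverse _ with _ | v <;>
          simp [h, pvFirst?, pvStepA_fst, pvStepA_snd] <;> split <;> simp

-- ===== VERDICT (by name: the statement is the Claim_ definition above) =====
theorem get_in_not_in_value_py_spec : Claim_equal_get_in_not_in_value_py := by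
  intro d key _
  unfold Spec_get_in_not_in_value_py get_in_not_in_value_py get_in_not_in_value_py_alt
  rcases h : get_in_not_in_value_py.pvLookupL d key with _ | lst <;>
    simp [h, pvFold_eq, pvLast_eq_first, pvFirst?, pvGetList_eq]
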